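-- pv_equiv track=rewrite | github.com/hikimory/yandex_handbooks_education | yandex_algorithms_handbook/3.3 Динамическое программирование/A/solution.py | rocks
-- ===== SOURCE A (Python) =====
-- def rocks(n, m):
--     R = [[False] * (m + 1) for _ in range(n + 1)]
--
--     # Fill the first row
--     for i in range(1, n + 1):
--         R[i][0] = False if R[i - 1][0] else True
--
--     # Fill the first column
--     for j in range(1, m + 1):
--         R[0][j] = False if R[0][j - 1] else True
--
--     # Fill the rest of the matrix
--     for i in range(1, n + 1):
--         for j in range(1, m + 1):
--             if R[i - 1][j - 1] and R[i][j - 1] and R[i - 1][j]: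
--                 R[i][j] = False
--             else:
--                 R[i][j] = True
--
--     return "Win" if R[n][m] else "Lose"
-- ===== SOURCE B (Python) =====
-- def rocks(n, m):
--     # Closed form: the position is losing exactly when both pile heights are even.
--     return "Lose" if n % 2 == 0 and m % 2 == 0 else "Win"
-- ===== Notes on version B (the rewrite author's own statement) =====
-- stated objective: faster
-- what changed: Replaces the O(n*m) game-DP table with the closed-form parity rule: the position is losing iff both n and m are even.
import Mathlib
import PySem

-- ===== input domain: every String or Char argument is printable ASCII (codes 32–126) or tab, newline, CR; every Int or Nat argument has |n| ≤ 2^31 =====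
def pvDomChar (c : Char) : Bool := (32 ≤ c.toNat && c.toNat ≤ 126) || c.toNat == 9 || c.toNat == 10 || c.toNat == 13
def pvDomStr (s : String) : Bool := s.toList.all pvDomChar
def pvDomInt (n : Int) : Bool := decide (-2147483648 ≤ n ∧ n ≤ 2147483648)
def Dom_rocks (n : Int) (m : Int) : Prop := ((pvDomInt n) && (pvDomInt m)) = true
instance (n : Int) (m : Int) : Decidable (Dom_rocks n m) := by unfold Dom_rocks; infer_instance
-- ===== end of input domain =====

-- B replaces A's O(n*m) game-DP table with the O(1) parity closed form (Lose iff n and m are both even).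

-- ===== PORT A =====
-- R[i][j] read/write on the list-of-lists table (indices are in range on Pre_, as in the Python)
def pvGet (R : List (List Bool)) (i j : Nat) : Bool := (R.getD i []).getD j false
def pvSet (R : List (List Bool)) (i j : Nat) (v : Bool) : List (List Bool) :=
  R.set i ((R.getD i []).set j v)

-- literal transliteration of A; `List.range' 1 k` ports range(1, k+1), exact for n,m ≥ 0 (Pre_)
def rocks (n : Int) (m : Int) : String :=
  let N := n.toNat
  let M := m.toNat
  let R0 : List (List Bool) := List.replicate (N + 1) (List.replicate (M + 1) false)
  -- Fill the first row
  let R1 := (List.range' 1 N).foldl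
      (fun R i => pvSet R i 0 (if pvGet R (i - 1) 0 then false else true)) R0
  -- Fill the first column
  let R2 := (List.range' 1 M).foldl
      (fun R j => pvSet R 0 j (if pvGet R 0 (j - 1) then false else true)) R1
  -- Fill the rest of the matrix
  let R3 := (List.range' 1 N).foldl
      (fun R i => (List.range' 1 M).foldl
        (fun R j =>
          if pvGet R (i - 1) (j - 1) && pvGet R i (j - 1) && pvGet R (i - 1) j
          then pvSet R i j false else pvSet R i j true) R) R2
  if pvGet R3 N M then "Win" else "Lose"

-- ===== PORT B =====
def rocks_alt (n : Int) (m : Int) : String :=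
  if PySem.Int.mod n 2 == 0 && PySem.Int.mod m 2 == 0 then "Lose" else "Win"

-- ===== PRECONDITION & SPEC =====
-- A raises IndexError when n < 0 or m < 0 (the table, or each of its rows, is empty there).
def Pre_rocks (n : Int) (m : Int) : Prop := 0 ≤ n ∧ 0 ≤ m
instance (n : Int) (m : Int) : Decidable (Pre_rocks n m) := by unfold Pre_rocks; infer_instance
def pvWitness_rocks : Int × Int := (2, 3)

def Spec_rocks (n : Int) (m : Int) (out : String) : Prop := out = rocks_alt n m
instance (n : Int) (m : Int) (out : String) : Decidable (Spec_rocks n m out) := by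
  unfold Spec_rocks; infer_instance

-- ===== CLAIM (what is proved, stated in full; the proofs are below) =====
def Claim_equal_rocks : Prop :=
  ∀ (n : Int) (m : Int), Dom_rocks n m → Pre_rocks n m → Spec_rocks n m (rocks n m)

-- ===== LEMMAS AND PROOFS =====

-- the closed-form winning predicate: (i, j) is a win iff i or j is odd
def pvS (i j : Nat) : Bool := decide (i % 2 = 1) || decide (j % 2 = 1)

-- invariant: R is an (Nn+1)×(Mm+1) table whose in-range entries are given by f
def MatInv (Nn Mm : Nat) (R : List (List Bool)) (f : Nat → Nat → Bool) : Prop :=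
  R.length = Nn + 1 ∧ (∀ r ∈ R, r.length = Mm + 1) ∧
    ∀ i j, i ≤ Nn → j ≤ Mm → pvGet R i j = f i j

theorem matInv_congr {Nn Mm : Nat} {R : List (List Bool)} {f g : Nat → Nat → Bool}
    (h : MatInv Nn Mm R f) (hfg : ∀ i j, i ≤ Nn → j ≤ Mm → f i j = g i j) :
    MatInv Nn Mm R g :=
  ⟨h.1, h.2.1, fun i j hi hj => (h.2.2 i j hi hj).trans (hfg i j hi hj)⟩

theorem matInv_init (Nn Mm : Nat) :
    MatInv Nn Mm (List.replicate (Nn + 1) (List.replicate (Mm + 1) false))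
      (fun _ _ => false) := by
  refine ⟨by simp, by intro r hr; simp_all [List.eq_of_mem_replicate hr], ?_⟩
  intro i j hi hj
  simp [pvGet, List.getD, hi, hj]

theorem matInv_set {Nn Mm : Nat} {R : List (List Bool)} {f : Nat → Nat → Bool}
    (h : MatInv Nn Mm R f) {i j : Nat} (hi : i ≤ Nn) (hj : j ≤ Mm) (v : Bool) :
    MatInv Nn Mm (pvSet R i j v)
      (fun i' j' => if i' = i ∧ j' = j then v else f i' j') := by
  obtain ⟨hlen, hrows, hval⟩ := h
  have hiR : i < R.length := by omega
  have hrowi : R.getD i [] = R[i] := by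
    simp [List.getD, List.getElem?_eq_getElem hiR]
  have hrowlen : (R.getD i []).length = Mm + 1 := by
    rw [hrowi]; exact hrows _ (R.getElem_mem hiR)
  refine ⟨by simp [pvSet, hlen], ?_, ?_⟩
  · intro r hr
    rcases List.mem_or_eq_of_mem_set hr with hr' | hr'
    · exact hrows r hr'
    · subst hr'; rw [List.length_set]; exact hrowlen
  · intro i' j' hi' hj'
    have hrow' : (R.set i ((R.getD i []).set j v)).getD i' [] =
        if i = i' then (R.getD i []).set j v else R.getD i' [] := by
      simp only [List.getD, List.getElem?_set]
      by_cases h' : i = i'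
      · subst h'; simp [hiR]
      · simp [h']
    show ((R.set i ((R.getD i []).set j v)).getD i' []).getD j' false =
      if i' = i ∧ j' = j then v else f i' j'
    rw [hrow']
    by_cases hii : i' = i
    · subst hii
      rw [if_pos rfl]
      by_cases hjj : j' = j
      · subst hjj
        set r := R.getD i' [] with hr
        have hlt : j' < r.length := by omega
        simp [List.getD, hlt]
      · rw [if_neg (by tauto : ¬ (i' = i' ∧ j' = j))]
        set r := R.getD i' [] with hr
        have : (r.set j v).getD j' false = r.getD j' false := by
          simp only [List.getD, List.getElem?_set]
          simp [show ¬ j = j' from by omega]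
        rw [this, hr]
        exact hval i' j' hi' hj'
    · rw [if_neg (Ne.symm hii), if_neg (by tauto : ¬ (i' = i ∧ j' = j))]
      exact hval i' j' hi' hj'

-- Phase 1: Python's "first row" loop, writing R[i][0] for i = 1..Nn
theorem phase1 {Nn Mm : Nat} {R0 : List (List Bool)}
    (h0 : MatInv Nn Mm R0 (fun _ _ => false)) :
    ∀ k, k ≤ Nn →
      MatInv Nn Mm
        ((List.range' 1 k).foldl
          (fun R i => pvSet R i 0 (if pvGet R (i - 1) 0 then false else true)) R0)
        (fun i j => if j = 0 ∧ i ≤ k then decide (i % 2 = 1) else false) := by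
  intro k
  induction k with
  | zero =>
    intro _
    refine matInv_congr h0 ?_
    intro i j _ _
    beta_reduce
    by_cases hc : j = 0 ∧ i ≤ 0
    · rw [if_pos hc]
      simp [show i = 0 from by omega]
    · rw [if_neg hc]
  | succ k ih =>
    intro hk
    have hk' : k ≤ Nn := by omega
    rw [List.range'_1_concat, List.foldl_append]
    simp only [List.foldl_cons, List.foldl_nil]
    have hprev := ih hk'
    have hget : pvGet ((List.range' 1 k).foldl
        (fun R i => pvSet R i 0 (if pvGet R (i - 1) 0 then false else true)) R0)
        (1 + k - 1) 0 = decide (k % 2 = 1) := by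
      rw [hprev.2.2 (1 + k - 1) 0 (by omega) (by omega)]
      beta_reduce
      rw [show 1 + k - 1 = k from by omega, if_pos ⟨rfl, le_refl k⟩]
    rw [hget]
    refine matInv_congr (matInv_set hprev (by omega) (by omega) _) ?_
    intro i j hi hj
    beta_reduce
    by_cases hik : i = 1 + k ∧ j = 0
    · have h2 : j = 0 ∧ i ≤ k + 1 := ⟨hik.2, by omega⟩
      rw [if_pos hik, if_pos h2, hik.1]
      rcases Nat.mod_two_eq_zero_or_one k with hkp | hkp
      · have h1 : (1 + k) % 2 = 1 := by omega
        simp [hkp, h1]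
      · have h1 : (1 + k) % 2 = 0 := by omega
        simp [hkp, h1]
    · rw [if_neg hik]
      by_cases hc : j = 0 ∧ i ≤ k
      · rw [if_pos hc, if_pos ⟨hc.1, by omega⟩]
      · rw [if_neg hc, if_neg (by omega : ¬ (j = 0 ∧ i ≤ k + 1))]

-- Phase 2: Python's "first column" loop, writing R[0][j] for j = 1..Mm
theorem phase2 {Nn Mm : Nat} {R1 : List (List Bool)}
    (h1 : MatInv Nn Mm R1 (fun i j => if j = 0 then decide (i % 2 = 1) else false)) :
    ∀ k, k ≤ Mm →
      MatInv Nn Mm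
        ((List.range' 1 k).foldl
          (fun R j => pvSet R 0 j (if pvGet R 0 (j - 1) then false else true)) R1)
        (fun i j => if j = 0 then decide (i % 2 = 1)
          else if i = 0 ∧ j ≤ k then decide (j % 2 = 1) else false) := by
  intro k
  induction k with
  | zero =>
    intro _
    refine matInv_congr h1 ?_
    intro i j _ _
    beta_reduce
    by_cases hj : j = 0
    · rw [if_pos hj, if_pos hj]
    · rw [if_neg hj, if_neg hj, if_neg (by omega : ¬ (i = 0 ∧ j ≤ 0))]
  | succ k ih =>
    intro hk
    have hk' : k ≤ Mm := by omega
    rw [List.range'_1_concat, List.foldl_append]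
    simp only [List.foldl_cons, List.foldl_nil]
    have hprev := ih hk'
    have hget : pvGet ((List.range' 1 k).foldl
        (fun R j => pvSet R 0 j (if pvGet R 0 (j - 1) then false else true)) R1)
        0 (1 + k - 1) = decide (k % 2 = 1) := by
      rw [hprev.2.2 0 (1 + k - 1) (by omega) (by omega)]
      beta_reduce
      rw [show 1 + k - 1 = k from by omega]
      by_cases hk0 : k = 0
      · subst hk0; simp
      · rw [if_neg hk0, if_pos ⟨rfl, le_refl k⟩]
    rw [hget]
    refine matInv_congr (matInv_set hprev (by omega) (by omega) _) ?_
    intro i j hi hj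
    beta_reduce
    by_cases hij : i = 0 ∧ j = 1 + k
    · have hjne : ¬ j = 0 := by omega
      have h2 : i = 0 ∧ j ≤ k + 1 := ⟨hij.1, by omega⟩
      rw [if_pos hij, if_neg hjne, if_pos h2, hij.2]
      rcases Nat.mod_two_eq_zero_or_one k with hkp | hkp
      · have h1 : (1 + k) % 2 = 1 := by omega
        simp [hkp, h1]
      · have h1 : (1 + k) % 2 = 0 := by omega
        simp [hkp, h1]
    · rw [if_neg hij]
      by_cases hj0 : j = 0
      · rw [if_pos hj0, if_pos hj0]
      · rw [if_neg hj0, if_neg hj0]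
        by_cases hc : i = 0 ∧ j ≤ k
        · rw [if_pos hc, if_pos ⟨hc.1, by omega⟩]
        · rw [if_neg hc, if_neg (by omega : ¬ (i = 0 ∧ j ≤ k + 1))]

-- Phase 3, inner loop: row i is filled left to right
theorem phase3_inner {Nn Mm : Nat} {i : Nat} (hi1 : 1 ≤ i) (hiN : i ≤ Nn)
    {R : List (List Bool)}
    (h : MatInv Nn Mm R (fun i' j' => if i' < i ∨ j' = 0 then pvS i' j' else false)) :
    ∀ k, k ≤ Mm →
      MatInv Nn Mm
        ((List.range' 1 k).foldl
          (fun R j =>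
            if pvGet R (i - 1) (j - 1) && pvGet R i (j - 1) && pvGet R (i - 1) j
            then pvSet R i j false else pvSet R i j true) R)
        (fun i' j' => if i' < i ∨ j' = 0 ∨ (i' = i ∧ j' ≤ k) then pvS i' j' else false) := by
  intro k
  induction k with
  | zero =>
    intro _
    refine matInv_congr h ?_
    intro i' j' _ _
    beta_reduce
    by_cases hc : i' < i ∨ j' = 0
    · rw [if_pos hc, if_pos (by tauto)]
    · rw [if_neg hc, if_neg (by omega : ¬ (i' < i ∨ j' = 0 ∨ (i' = i ∧ j' ≤ 0)))]
  | succ k ih =>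
    intro hk
    have hk' : k ≤ Mm := by omega
    rw [List.range'_1_concat, List.foldl_append]
    simp only [List.foldl_cons, List.foldl_nil]
    have hprev := ih hk'
    set Rk := (List.range' 1 k).foldl
        (fun R j =>
          if pvGet R (i - 1) (j - 1) && pvGet R i (j - 1) && pvGet R (i - 1) j
          then pvSet R i j false else pvSet R i j true) R with hRk
    have g1 : pvGet Rk (i - 1) (1 + k - 1) = pvS (i - 1) k := by
      rw [hprev.2.2 (i - 1) (1 + k - 1) (by omega) (by omega)]
      beta_reduce
      rw [show 1 + k - 1 = k from by omega, if_pos (Or.inl (by omega))]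
    have g2 : pvGet Rk i (1 + k - 1) = pvS i k := by
      rw [hprev.2.2 i (1 + k - 1) (by omega) (by omega)]
      beta_reduce
      rw [show 1 + k - 1 = k from by omega]
      by_cases hk0 : k = 0
      · subst hk0; rw [if_pos (by tauto)]
      · rw [if_pos (Or.inr (Or.inr ⟨rfl, le_refl k⟩))]
    have g3 : pvGet Rk (i - 1) (1 + k) = pvS (i - 1) (1 + k) := by
      rw [hprev.2.2 (i - 1) (1 + k) (by omega) (by omega)]
      beta_reduce
      rw [if_pos (Or.inl (by omega))]
    rw [g1, g2, g3]
    have hval : (if pvS (i - 1) k && pvS i k && pvS (i - 1) (1 + k)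
        then pvSet Rk i (1 + k) false else pvSet Rk i (1 + k) true)
        = pvSet Rk i (1 + k) (pvS i (1 + k)) := by
      have him : (i - 1) % 2 = 1 ↔ ¬ (i % 2 = 1) := by omega
      have hkm : (1 + k) % 2 = 1 ↔ ¬ (k % 2 = 1) := by omega
      by_cases hip : i % 2 = 1 <;> by_cases hkp : k % 2 = 1 <;>
        simp [pvS, hip, hkp, him, hkm]
    rw [hval]
    refine matInv_congr (matInv_set hprev (by omega) (by omega) _) ?_
    intro i' j' hi' hj'
    beta_reduce
    by_cases hij : i' = i ∧ j' = 1 + k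
    · have h2 : i' < i ∨ j' = 0 ∨ (i' = i ∧ j' ≤ k + 1) := by omega
      rw [if_pos hij, if_pos h2, hij.1, hij.2]
    · rw [if_neg hij]
      by_cases hc : i' < i ∨ j' = 0 ∨ (i' = i ∧ j' ≤ k)
      · rw [if_pos hc, if_pos (by omega : i' < i ∨ j' = 0 ∨ (i' = i ∧ j' ≤ k + 1))]
      · rw [if_neg hc, if_neg (by omega : ¬ (i' < i ∨ j' = 0 ∨ (i' = i ∧ j' ≤ k + 1)))]

-- Phase 3, outer loop
theorem phase3 {Nn Mm : Nat} {R2 : List (List Bool)}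
    (h2 : MatInv Nn Mm R2 (fun i j => if i = 0 ∨ j = 0 then pvS i j else false)) :
    ∀ t, t ≤ Nn →
      MatInv Nn Mm
        ((List.range' 1 t).foldl
          (fun R i => (List.range' 1 Mm).foldl
            (fun R j =>
              if pvGet R (i - 1) (j - 1) && pvGet R i (j - 1) && pvGet R (i - 1) j
              then pvSet R i j false else pvSet R i j true) R) R2)
        (fun i j => if i ≤ t ∨ j = 0 then pvS i j else false) := by
  intro t
  induction t with
  | zero =>
    intro _
    refine matInv_congr h2 ?_
    intro i j _ _
    beta_reduce
    by_cases hc : i = 0 ∨ j = 0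
    · rw [if_pos hc, if_pos (by omega : i ≤ 0 ∨ j = 0)]
    · rw [if_neg hc, if_neg (by omega : ¬ (i ≤ 0 ∨ j = 0))]
  | succ t ih =>
    intro ht
    have ht' : t ≤ Nn := by omega
    rw [List.range'_1_concat, List.foldl_append]
    simp only [List.foldl_cons, List.foldl_nil]
    have hprev := ih ht'
    have hstart := matInv_congr hprev
      (g := fun i' j' => if i' < 1 + t ∨ j' = 0 then pvS i' j' else false)
      (by
        intro i j _ _
        beta_reduce
        by_cases hc : i ≤ t ∨ j = 0
        · rw [if_pos hc, if_pos (by omega : i < 1 + t ∨ j = 0)]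
        · rw [if_neg hc, if_neg (by omega : ¬ (i < 1 + t ∨ j = 0))])
    have hinner := phase3_inner (i := 1 + t) (by omega) (by omega) hstart Mm (le_refl _)
    refine matInv_congr hinner ?_
    intro i j hi hj
    beta_reduce
    by_cases hc : i < 1 + t ∨ j = 0 ∨ (i = 1 + t ∧ j ≤ Mm)
    · rw [if_pos hc, if_pos (by omega : i ≤ t + 1 ∨ j = 0)]
    · rw [if_neg hc, if_neg (by omega : ¬ (i ≤ t + 1 ∨ j = 0))]

theorem rocks_closed (n m : Int) :
    rocks n m = if pvS n.toNat m.toNat then "Win" else "Lose" := by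
  simp only [rocks]
  set Nn := n.toNat
  set Mm := m.toNat
  have h0 := matInv_init Nn Mm
  have h1 := phase1 (Mm := Mm) h0 Nn (le_refl _)
  have h1' := matInv_congr h1 (g := fun i j => if j = 0 then decide (i % 2 = 1) else false)
    (by
      intro i j hi _
      beta_reduce
      by_cases hj : j = 0
      · rw [if_pos ⟨hj, hi⟩, if_pos hj]
      · rw [if_neg (by tauto), if_neg hj])
  have h2 := phase2 h1' Mm (le_refl _)
  have h2' := matInv_congr h2 (g := fun i j => if i = 0 ∨ j = 0 then pvS i j else false)
    (by
      intro i j _ hj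
      beta_reduce
      by_cases hj0 : j = 0
      · rw [if_pos hj0, if_pos (Or.inr hj0)]
        simp [hj0, pvS]
      · rw [if_neg hj0]
        by_cases hi0 : i = 0
        · rw [if_pos ⟨hi0, hj⟩, if_pos (Or.inl hi0)]
          simp [hi0, pvS]
        · rw [if_neg (by tauto), if_neg (by tauto)])
  have h3 := phase3 h2' Nn (le_refl _)
  rw [h3.2.2 Nn Mm (le_refl _) (le_refl _)]
  beta_reduce
  rw [if_pos (Or.inl (le_refl Nn))]

-- ===== VERDICT (by name: the statement is the Claim_ definition above) =====
theorem rocks_spec : Claim_equal_rocks := by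
  intro n m _ hpre
  obtain ⟨hn, hm⟩ := hpre
  unfold Spec_rocks rocks_alt
  rw [rocks_closed n m]
  rw [PySem.Int.mod_eq_emod_of_pos (by norm_num : (0:Int) < 2),
    PySem.Int.mod_eq_emod_of_pos (by norm_num : (0:Int) < 2)]
  have hn2 : n % 2 = (n.toNat % 2 : Nat) := by omega
  have hm2 : m % 2 = (m.toNat % 2 : Nat) := by omega
  rw [hn2, hm2]
  rcases Nat.mod_two_eq_zero_or_one n.toNat with h1 | h1 <;>
    rcases Nat.mod_two_eq_zero_or_one m.toNat with h2 | h2 <;>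
      simp [pvS, h1, h2]
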